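-- pv_equiv track=rewrite | github.com/z-gong/mstk | mstk/analyzer/vle.py | N_vaporize_condense
-- ===== SOURCE A (Python) =====
-- def N_vaporize_condense(phases):
--     '''
--     Check how many times one molecules have vaporized or condensed
--
--     Parameters
--     ----------
--     phases : list of str
--         The time evolution of the phase one molecule stayed in.
--         The elements in this list can only be 'l', 'i' or 'g', which means liquid, interface and gas phase.
--
--     Returns
--     -------
--     N_vapor: int
--         Times of vaporization (transit from liquid to gas phase)
--     N_condense: int
--         Times of condensation (transit from gas to liquid phase)
--
--     '''
--     N_vapor = N_condense = 0
--     phases = [i for i in phases if i != 'i']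
--     while len(phases) > 1:
--         if phases[0] == 'l' and phases[1] == 'g':
--             N_vapor += 1
--         elif phases[0] == 'g' and phases[1] == 'l':
--             N_condense += 1
--         phases.pop(0)
--
--     return N_vapor, N_condense
-- ===== SOURCE B (Python) =====
-- def N_vaporize_condense(phases):
--     N_vapor = N_condense = 0
--     prev = None
--     for p in phases:
--         if p == 'i':
--             continue
--         if prev == 'l' and p == 'g':
--             N_vapor += 1
--         elif prev == 'g' and p == 'l':
--             N_condense += 1
--         prev = p
--     return N_vapor, N_condense
-- ===== Notes on version B (the rewrite author's own statement) =====
-- stated objective: faster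
-- what changed: Replaced the filter-then-destructive-while-pop(0) scan with a single linear pass that tracks the previous non-'i' phase, so no intermediate list is destroyed and pop(0)'s O(n) shifting disappears.
import Mathlib
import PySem

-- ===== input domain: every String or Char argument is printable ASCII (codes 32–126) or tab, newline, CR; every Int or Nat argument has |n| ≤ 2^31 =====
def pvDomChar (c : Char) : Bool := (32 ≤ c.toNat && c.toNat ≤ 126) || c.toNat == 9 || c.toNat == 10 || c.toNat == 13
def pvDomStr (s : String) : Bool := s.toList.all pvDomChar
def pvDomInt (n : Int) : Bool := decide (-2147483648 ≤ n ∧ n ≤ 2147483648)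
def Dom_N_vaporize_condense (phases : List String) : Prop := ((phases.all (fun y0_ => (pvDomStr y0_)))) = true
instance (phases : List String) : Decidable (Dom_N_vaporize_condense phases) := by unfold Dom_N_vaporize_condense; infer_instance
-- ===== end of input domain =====

-- B replaces A's filter-then-while-pop(0) (quadratic list shifting) with one linear pass
-- tracking the previous non-'i' phase; return value only, no observable mutation difference.

-- ===== PORT A =====
-- A's while loop: look at the first two elements, maybe bump a counter, pop the head.
def nvcLoopA : List String → Int × Int → Int × Int
  | a :: b :: rest, (v, c) =>
    nvcLoopA (b :: rest)
      (if a = "l" ∧ b = "g" then (v + 1, c)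
       else if a = "g" ∧ b = "l" then (v, c + 1)
       else (v, c))
  | _, acc => acc

def N_vaporize_condense (phases : List String) : Int × Int :=
  nvcLoopA (phases.filter (fun s => s ≠ "i")) (0, 0)

-- ===== PORT B =====
-- B's loop body: skip 'i', compare with the remembered previous phase, update it.
def nvcStepB (st : Int × Int × Option String) (p : String) : Int × Int × Option String :=
  if p = "i" then st
  else
    let (v, c, prev) := st
    if prev = some "l" ∧ p = "g" then (v + 1, c, some p)
    else if prev = some "g" ∧ p = "l" then (v, c + 1, some p)
    else (v, c, some p)

def N_vaporize_condense_alt (phases : List String) : Int × Int :=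
  let st := phases.foldl nvcStepB (0, 0, none)
  (st.1, st.2.1)

-- ===== PRECONDITION & SPEC =====
def Spec_N_vaporize_condense (phases : List String) (out : Int × Int) : Prop := out = N_vaporize_condense_alt phases
instance (phases : List String) (out : Int × Int) : Decidable (Spec_N_vaporize_condense phases out) := by unfold Spec_N_vaporize_condense; infer_instance

-- ===== CLAIM (what is proved, stated in full; the proofs are below) =====
def Claim_equal_N_vaporize_condense : Prop := ∀ (phases : List String), Dom_N_vaporize_condense phases → Spec_N_vaporize_condense phases (N_vaporize_condense phases)

-- ===== LEMMAS AND PROOFS =====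

-- B's fold ignores 'i' elements, so it may run over the filtered list instead.
theorem nvc_fold_filter (l : List String) (st : Int × Int × Option String) :
    l.foldl nvcStepB st = (l.filter (fun s => s ≠ "i")).foldl nvcStepB st := by
  induction l generalizing st with
  | nil => rfl
  | cons a l ih =>
    by_cases ha : a = "i"
    · simp [ha, List.filter, nvcStepB, ih]
    · simp [List.filter, ha, List.foldl, ih]

-- On a list whose elements B never skips, B's fold from previous phase `a`
-- computes exactly A's pair-scan starting at `a`.
theorem nvc_fold_eq_loopA (l : List String) (a : String) (v c : Int)
    (hl : ∀ x ∈ l, x ≠ "i") :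
    ∃ pr, l.foldl nvcStepB (v, c, some a) =
      ((nvcLoopA (a :: l) (v, c)).1, (nvcLoopA (a :: l) (v, c)).2, pr) := by
  induction l generalizing a v c with
  | nil => exact ⟨some a, rfl⟩
  | cons b l ih =>
    have hb : b ≠ "i" := hl b (by simp)
    have hl' : ∀ x ∈ l, x ≠ "i" := fun x hx => hl x (by simp [hx])
    by_cases h1 : a = "l" ∧ b = "g"
    · simpa [nvcLoopA, nvcStepB, hb, h1] using ih b (v + 1) c hl'
    · by_cases h2 : a = "g" ∧ b = "l"
      · simpa [nvcLoopA, nvcStepB, hb, h1, h2] using ih b v (c + 1) hl'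
      · simpa [nvcLoopA, nvcStepB, hb, h1, h2] using ih b v c hl'

-- ===== VERDICT (by name: the statement is the Claim_ definition above) =====
theorem N_vaporize_condense_spec : Claim_equal_N_vaporize_condense := by
  intro phases _
  unfold Spec_N_vaporize_condense N_vaporize_condense N_vaporize_condense_alt
  rw [nvc_fold_filter]
  rcases hf : phases.filter (fun s => s ≠ "i") with _ | ⟨a, l⟩
  · simp [nvcLoopA]
  · have hmem : ∀ x ∈ a :: l, x ≠ "i" := by
      intro x hx
      have : x ∈ phases.filter (fun s => s ≠ "i") := hf ▸ hx
      simpa using (List.of_mem_filter this)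
    have ha : a ≠ "i" := hmem a (by simp)
    have hl : ∀ x ∈ l, x ≠ "i" := fun x hx => hmem x (by simp [hx])
    obtain ⟨pr, hpr⟩ := nvc_fold_eq_loopA l a 0 0 hl
    simp [List.foldl, nvcStepB, ha, hpr]
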